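-- pv_equiv track=rewrite | github.com/Python-Data-Science-Class-3/homework | WEEK-3 FUNCTIONS/04-TubaG/egualreverse.py | equal_reverse
-- ===== SOURCE A (Python) =====
-- def equal_reverse(word_list):  #creatin the function
--
--     # word_list =list(reversed(word_list))  #sort parameter in reverse order to create a List
--     '''reverse etmemize gerek yok. input ile aldigimiz listeyi degistiriyor ve yanlis sonuca sebep oluyor'''
--
--     result_list = []
--     '''her bir kelime icin kontrol etmeliyiz bunlarida bir listede tutalim.'''
--
--     for i in word_list:    #returning  the parameter with a for loop
--         if i == i[::-1]: #if the parameter is equal in rerverse order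
--
--             result_list.append(True)
--             '''her seferinde return etmek yerine listede tutalim'''
--         #  return True #True command
--
--         else:  #if the parameter is not equal in reverse, False command
--
--             result_list.append(False)
--         #  return False
--
--     '''Sonuc olarak listeyi return edebiliriz'''
--     return result_list
-- ===== SOURCE B (Python) =====
-- def equal_reverse(word_list):
--     def is_pal(w):
--         left, right = 0, len(w) - 1
--         while left < right:
--             if w[left] != w[right]:
--                 return False
--             left += 1
--             right -= 1
--         return True
--     return [is_pal(w) for w in word_list]
-- ===== Notes on version B (the rewrite author's own statement) =====
-- stated objective: alternative
-- what changed: Replaces building a reversed copy of each word and comparing whole strings with an in-place two-pointer scan from both ends that exits on the first mismatch; the result list is built by a comprehension instead of repeated appends.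
import Mathlib
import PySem

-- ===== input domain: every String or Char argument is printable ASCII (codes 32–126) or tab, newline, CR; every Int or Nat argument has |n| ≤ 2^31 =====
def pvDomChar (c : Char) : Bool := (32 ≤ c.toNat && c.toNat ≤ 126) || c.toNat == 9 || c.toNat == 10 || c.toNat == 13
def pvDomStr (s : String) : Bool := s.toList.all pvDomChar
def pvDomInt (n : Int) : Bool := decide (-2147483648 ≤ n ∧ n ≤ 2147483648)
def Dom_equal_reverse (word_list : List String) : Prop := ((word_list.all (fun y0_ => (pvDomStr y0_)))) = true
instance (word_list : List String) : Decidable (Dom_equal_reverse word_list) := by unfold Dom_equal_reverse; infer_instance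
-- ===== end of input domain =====

-- B replaces A's reverse-and-compare test with an early-exit two-pointer scan of each word (objective: alternative).

-- ===== PORT A =====
-- for i in word_list: append (i == i[::-1]) to result_list
def equal_reverse (word_list : List String) : List Bool :=
  word_list.foldl
    (fun result_list i =>
      if some i == PySem.Str.slice? i none none (-1) then result_list ++ [true]
      else result_list ++ [false])
    []

-- ===== PORT B =====
-- the while-loop of Source B's is_pal: left/right move inward, False on first mismatch.
-- The default 'a' of pyGetD is never consulted: while the loop runs, 0 ≤ left < right ≤ len-1.
def pvPalLoop (w : List Char) (left right : Int) : Bool :=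
  if left < right then
    if PySem.List.pyGetD w left 'a' ≠ PySem.List.pyGetD w right 'a' then false
    else pvPalLoop w (left + 1) (right - 1)
  else true
termination_by (right - left).toNat
decreasing_by omega

def pvIsPal (w : String) : Bool := pvPalLoop w.toList 0 (PySem.Str.len w - 1)

def equal_reverse_alt (word_list : List String) : List Bool := word_list.map pvIsPal

-- ===== PRECONDITION & SPEC =====
def Spec_equal_reverse (word_list : List String) (out : List Bool) : Prop := out = equal_reverse_alt word_list
instance (word_list : List String) (out : List Bool) : Decidable (Spec_equal_reverse word_list out) := by unfold Spec_equal_reverse; infer_instance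

-- ===== CLAIM (what is proved, stated in full; the proofs are below) =====
def Claim_equal_equal_reverse : Prop := ∀ (word_list : List String), Dom_equal_reverse word_list → Spec_equal_reverse word_list (equal_reverse word_list)

-- ===== LEMMAS AND PROOFS =====

-- indexing the middle of a :: mid ++ [b] is indexing mid, one position left
-- indexing the middle of a :: mid ++ [b] is indexing mid, one position left
lemma pv_getD_shift (a b : Char) (mid : List Char) (k : Int) (d : Char)
    (h0 : 0 ≤ k) (h1 : k < (mid.length : Int)) :
    PySem.List.pyGetD (a :: mid ++ [b]) (k + 1) d = PySem.List.pyGetD mid k d := by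
  rw [PySem.List.pyGetD_eq_getElem _ _ (by omega) (by simp; omega),
      PySem.List.pyGetD_eq_getElem _ _ h0 (by simpa using h1)]
  have hk : (k + 1).toNat = k.toNat + 1 := by omega
  have h1' : k.toNat < mid.length := by omega
  simp [hk, List.getElem_cons_succ, List.getElem_append_left, h1']

-- the scan over the middle window of a :: mid ++ [b] is the scan over mid
lemma pv_pal_shift (a b : Char) (mid : List Char) (l r : Int)
    (hl : 0 ≤ l) (hr : r < (mid.length : Int)) :
    pvPalLoop (a :: mid ++ [b]) (l + 1) (r + 1) = pvPalLoop mid l r := by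
  conv_lhs => rw [pvPalLoop]
  conv_rhs => rw [pvPalLoop]
  by_cases h : l < r
  · rw [if_pos (show l + 1 < r + 1 by omega), if_pos h,
        pv_getD_shift a b mid l 'a' hl (by omega), pv_getD_shift a b mid r 'a' (by omega) hr]
    split_ifs with hne
    · rfl
    · have harith : pvPalLoop (a :: mid ++ [b]) (l + 1 + 1) (r + 1 - 1)
           = pvPalLoop (a :: mid ++ [b]) ((l + 1) + 1) ((r - 1) + 1) := by ring_nf
      rw [harith, pv_pal_shift a b mid (l + 1) (r - 1) (by omega) (by omega)]
  · rw [if_neg (show ¬ (l + 1 < r + 1) by omega), if_neg h]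
termination_by (r - l).toNat
decreasing_by omega

-- the two-pointer scan decides "cs equals its reverse"
lemma pv_pal_main (cs : List Char) :
    pvPalLoop cs 0 ((cs.length : Int) - 1) = decide (cs = cs.reverse) := by
  induction cs using List.bidirectionalRec with
  | nil => rw [pvPalLoop]; simp
  | singleton a => rw [pvPalLoop]; simp
  | cons_append a mid b ih =>
    rw [pvPalLoop]
    have hL : ((a :: (mid ++ [b])).length : Int) - 1 = (mid.length : Int) + 1 := by
      simp
    rw [hL, if_pos (show (0 : Int) < (mid.length : Int) + 1 by omega)]
    have hA : PySem.List.pyGetD (a :: (mid ++ [b])) 0 'a' = a :=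
      PySem.List.pyGetD_zero_cons a (mid ++ [b]) 'a'
    have hB : PySem.List.pyGetD (a :: (mid ++ [b])) ((mid.length : Int) + 1) 'a' = b := by
      rw [PySem.List.pyGetD_eq_getElem _ _ (by omega) (by simp)]
      have hidx : ((mid.length : Int) + 1).toNat = mid.length + 1 := by omega
      simp only [hidx, List.getElem_cons_succ]
      exact List.getElem_concat_length rfl (by simp)
    rw [hA, hB]
    by_cases hab : a = b
    · subst hab
      rw [if_neg (show ¬ (a ≠ a) by simp)]
      have hcall : pvPalLoop (a :: (mid ++ [a])) (0 + 1) ((mid.length : Int) + 1 - 1)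
          = pvPalLoop mid 0 ((mid.length : Int) - 1) := by
        have h2 : (mid.length : Int) + 1 - 1 = ((mid.length : Int) - 1) + 1 := by omega
        rw [h2]
        exact pv_pal_shift a a mid 0 ((mid.length : Int) - 1) le_rfl (by omega)
      have hrev : (a :: (mid ++ [a])).reverse = a :: (mid.reverse ++ [a]) := by simp
      have hiff : (a :: (mid ++ [a]) = (a :: (mid ++ [a])).reverse) ↔ (mid = mid.reverse) := by
        rw [hrev]
        constructor
        · intro h
          exact List.append_cancel_right (List.cons.inj h).2
        · intro h
          rw [← h]
      rw [hcall, ih]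
      exact (decide_eq_decide.mpr hiff).symm
    · rw [if_pos (show a ≠ b from hab)]
      have hrev : (a :: (mid ++ [b])).reverse = b :: (mid.reverse ++ [a]) := by simp
      have hne : ¬ (a :: (mid ++ [b]) = (a :: (mid ++ [b])).reverse) := by
        rw [hrev]
        intro h
        exact hab (List.cons.inj h).1
      rw [decide_eq_false hne]

-- A's per-word test equals B's per-word test
lemma pv_cond_eq (i : String) :
    (some i == PySem.Str.slice? i none none (-1)) = pvIsPal i := by
  rw [PySem.Str.slice?_none_none_neg_one]
  unfold pvIsPal
  rw [PySem.Str.len_eq, pv_pal_main]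
  have : (some i == some (String.ofList i.toList.reverse))
      = (i == String.ofList i.toList.reverse) := by
    simp
  rw [this, Bool.beq_eq_decide_eq]
  apply decide_eq_decide.mpr
  rw [String.ext_iff, String.toList_ofList]

lemma pv_foldl_eq (wl : List String) (acc : List Bool) :
    wl.foldl
      (fun result_list i =>
        if some i == PySem.Str.slice? i none none (-1) then result_list ++ [true]
        else result_list ++ [false])
      acc = acc ++ wl.map pvIsPal := by
  induction wl generalizing acc with
  | nil => simp
  | cons w ws ih =>
    simp only [List.foldl_cons, List.map_cons]
    rw [pv_cond_eq w]
    have : (if pvIsPal w then acc ++ [true] else acc ++ [false]) = acc ++ [pvIsPal w] := by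
      cases h : pvIsPal w <;> simp
    rw [this, ih, List.append_assoc]
    rfl

-- ===== VERDICT (by name: the statement is the Claim_ definition above) =====
theorem equal_reverse_spec : Claim_equal_equal_reverse := by
  intro word_list _
  unfold Spec_equal_reverse equal_reverse equal_reverse_alt
  rw [pv_foldl_eq word_list []]
  simp
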